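-- pv_equiv track=rewrite | github.com/gunjitmittal/network-topology | Final/Codes/traceroute_preprocess.py | parse_traceroute_data
-- ===== SOURCE A (Python) =====
-- def parse_traceroute_data(data):
--     traceroute_entries = data.strip().split("\n")
--     traceroutes = {}
--     current_traceroute = []
--     key = traceroute_entries[0]
--     for entry in traceroute_entries[1:]:
--         if(len(entry.split()) == 1):
--             if current_traceroute:
--                 traceroutes[key] = current_traceroute
--                 current_traceroute = []
--                 key = entry
--         else:
--             current_traceroute.append(entry)
--
--     if current_traceroute:
--         traceroutes[key] = current_traceroute
--
--     return traceroutes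
-- ===== SOURCE B (Python) =====
-- def parse_traceroute_data(data):
--     lines = data.strip().split("\n")
--     out = {}
--     key = lines[0]
--     i, n = 1, len(lines)
--     while i < n:
--         if len(lines[i].split()) == 1:
--             i += 1  # header with nothing pending: skipped (only the first header after a data run becomes the key)
--         else:
--             j = i + 1
--             while j < n and len(lines[j].split()) != 1:
--                 j += 1
--             out[key] = lines[i:j]
--             if j < n:
--                 key = lines[j]
--             i = j + 1
--     return out
-- ===== Notes on version B (the rewrite author's own statement) =====
-- stated objective: alternative
-- what changed: Replaces A's per-line buffer accumulation with final flush by a run-slicing walk: skip headers, cut each maximal data run out in one inner scan, and insert it into the dict at once, taking the next key from the run's terminating header.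
import Mathlib
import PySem

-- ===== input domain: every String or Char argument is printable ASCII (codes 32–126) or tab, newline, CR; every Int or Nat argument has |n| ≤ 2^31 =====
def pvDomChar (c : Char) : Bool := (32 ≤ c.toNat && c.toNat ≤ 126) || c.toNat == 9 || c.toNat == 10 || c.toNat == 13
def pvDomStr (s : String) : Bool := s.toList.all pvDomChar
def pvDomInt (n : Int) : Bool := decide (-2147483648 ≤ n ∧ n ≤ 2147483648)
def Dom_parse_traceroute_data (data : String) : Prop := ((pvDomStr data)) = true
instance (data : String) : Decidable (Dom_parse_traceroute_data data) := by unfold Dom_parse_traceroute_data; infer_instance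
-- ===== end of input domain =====

-- B replaces A's pending-buffer accumulation with an index-free run-slicing walk (skip headers, cut out each maximal
-- data run in one inner scan, insert it at once); objective: alternative decomposition, same cost.

-- ===== PORT A =====
-- 'len(entry.split()) == 1' header test
def pvHdr (e : String) : Bool := (PySem.Str.split₀ e).length == 1

-- the body of A's for-loop; state = (traceroutes, (current_traceroute, key))
def pvStepA (st : PySem.Dict String (List String) × List String × String) (entry : String) :
    PySem.Dict String (List String) × List String × String :=
  if pvHdr entry then
    if st.2.1 ≠ [] then (st.1.insert st.2.2 st.2.1, ([], entry)) else st
  else (st.1, (st.2.1 ++ [entry], st.2.2))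

-- A's trailing 'if current_traceroute: traceroutes[key] = current_traceroute'
def pvFlushA (st : PySem.Dict String (List String) × List String × String) :
    PySem.Dict String (List String) :=
  if st.2.1 ≠ [] then st.1.insert st.2.2 st.2.1 else st.1

def parse_traceroute_data (data : String) : List (String × List String) :=
  match (PySem.Str.split? (PySem.Str.strip data) "\n").getD [] with
  | [] => []   -- unreachable: str.split("\n") is never empty
  | key0 :: rest =>
      (pvFlushA (rest.foldl pvStepA (PySem.Dict.empty, ([], key0)))).items

-- ===== PORT B =====
-- B's inner while loop 'j = i+1; while j < n and not header: j += 1' together with the slices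
-- lines[i+1:j], lines[j:] — returned as (run, tail); exact transcription of that scan.
def pvRunScan (l : List String) : List String × List String :=
  match l with
  | [] => ([], [])
  | e :: r => if pvHdr e then ([], e :: r) else
      ((pvRunScan r).1.cons e, (pvRunScan r).2)

lemma pvRunScan_tail_le (l : List String) : (pvRunScan l).2.length ≤ l.length := by
  induction l with
  | nil => simp [pvRunScan]
  | cons e r ih =>
      simp only [pvRunScan]
      split
      · simp
      · simpa using Nat.le_succ_of_le ih

-- B's outer while loop; state = (out, key, remaining lines)
def pvLoopB (out : PySem.Dict String (List String)) (key : String) (l : List String) :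
    PySem.Dict String (List String) :=
  match l with
  | [] => out
  | e :: r =>
    if pvHdr e then pvLoopB out key r
    else
      match hs : (pvRunScan r).2 with
      | [] => out.insert key ((pvRunScan r).1.cons e)
      | t :: ts => pvLoopB (out.insert key ((pvRunScan r).1.cons e)) t ts
termination_by l.length
decreasing_by
  · simp
  · have h := pvRunScan_tail_le r
    rw [hs] at h
    simp at h ⊢
    omega

def parse_traceroute_data_alt (data : String) : List (String × List String) :=
  match (PySem.Str.split? (PySem.Str.strip data) "\n").getD [] with
  | [] => []   -- unreachable: str.split("\n") is never empty
  | key0 :: rest => (pvLoopB PySem.Dict.empty key0 rest).items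

-- ===== PRECONDITION & SPEC =====
def Spec_parse_traceroute_data (data : String) (out : List (String × List String)) : Prop := out = parse_traceroute_data_alt data
instance (data : String) (out : List (String × List String)) : Decidable (Spec_parse_traceroute_data data out) := by unfold Spec_parse_traceroute_data; infer_instance

-- ===== CLAIM (what is proved, stated in full; the proofs are below) =====
def Claim_equal_parse_traceroute_data : Prop := ∀ (data : String), Dom_parse_traceroute_data data → Spec_parse_traceroute_data data (parse_traceroute_data data)

-- ===== LEMMAS AND PROOFS =====

-- A's loop-plus-flush from any state equals B's walk: an empty buffer is B's plain state, a pending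
-- buffer is completed by the data run at the head of the remaining input and inserted.
lemma pvAB (rest : List String) :
    ∀ (tr : PySem.Dict String (List String)) (cur : List String) (key : String),
    pvFlushA (rest.foldl pvStepA (tr, (cur, key))) =
      (if cur = [] then pvLoopB tr key rest
       else match (pvRunScan rest).2 with
            | [] => tr.insert key (cur ++ (pvRunScan rest).1)
            | t :: ts => pvLoopB (tr.insert key (cur ++ (pvRunScan rest).1)) t ts) := by
  induction rest with
  | nil =>
      intro tr cur key
      by_cases hc : cur = [] <;>
        simp [pvFlushA, pvLoopB, pvRunScan, hc]
  | cons e r ih =>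
      intro tr cur key
      by_cases hh : pvHdr e
      · by_cases hc : cur = []
        · subst hc
          simp only [List.foldl_cons, pvStepA, hh, if_true, ne_eq, not_true_eq_false, if_neg,
            not_false_eq_true]
          simp only [if_pos rfl] at ih ⊢
          rw [ih tr [] key, pvLoopB]
          simp [hh]
        · simp only [List.foldl_cons, pvStepA, hh, if_true, ne_eq, hc, not_false_eq_true, if_pos]
          rw [ih (tr.insert key cur) [] e]
          simp only [if_pos rfl, if_neg hc, pvRunScan, hh, if_true]
          simp
      · simp only [List.foldl_cons, pvStepA, hh, Bool.false_eq_true, if_false]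
        rw [ih tr (cur ++ [e]) key]
        have hne : cur ++ [e] ≠ [] := by simp
        by_cases hc : cur = []
        · subst hc
          rw [pvLoopB]
          cases hs2 : (pvRunScan r).2 <;> simp [hh, hs2]
        · simp only [if_neg hne, if_neg hc, pvRunScan, hh, Bool.false_eq_true, if_false]
          cases hs : (pvRunScan r).2 <;> simp [List.append_assoc]

-- ===== VERDICT (by name: the statement is the Claim_ definition above) =====
theorem parse_traceroute_data_spec : Claim_equal_parse_traceroute_data := by
  intro data _
  unfold Spec_parse_traceroute_data parse_traceroute_data parse_traceroute_data_alt
  cases h : (PySem.Str.split? (PySem.Str.strip data) "\n").getD [] with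
  | nil => rfl
  | cons key0 rest =>
      show (pvFlushA (rest.foldl pvStepA (PySem.Dict.empty, ([], key0)))).items
            = (pvLoopB PySem.Dict.empty key0 rest).items
      have h2 := pvAB rest PySem.Dict.empty [] key0
      rw [if_pos rfl] at h2
      rw [h2]
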